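-- pv_equiv track=rewrite | github.com/Armmy2530/CU_Comprog_grader | 09/09_Nested_34/09_Nested_34.py | pattern3
-- ===== SOURCE A (Python) =====
-- def pattern3( N ):
--     ans = []
--     c = 1
--     for j in range(N):
--         temp = [0] * j
--         for _ in range(N-j):
--             temp.append(c)
--             c += 1
--         ans.append(temp)
--     return ans
-- ===== SOURCE B (Python) =====
-- def pattern3(N):
--     # closed-form cell values: row j starts at j*N - j*(j-1)//2 + 1, no running counter
--     return [[0 if i < j else j * N - j * (j - 1) // 2 + (i - j) + 1 for i in range(N)]
--             for j in range(N)]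
-- ===== Notes on version B (the rewrite author's own statement) =====
-- stated objective: alternative
-- what changed: Replaces the cross-row mutable counter and append loops by a closed-form expression j*N - j*(j-1)//2 + (i-j) + 1 computed independently per cell in a nested comprehension.
import Mathlib
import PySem

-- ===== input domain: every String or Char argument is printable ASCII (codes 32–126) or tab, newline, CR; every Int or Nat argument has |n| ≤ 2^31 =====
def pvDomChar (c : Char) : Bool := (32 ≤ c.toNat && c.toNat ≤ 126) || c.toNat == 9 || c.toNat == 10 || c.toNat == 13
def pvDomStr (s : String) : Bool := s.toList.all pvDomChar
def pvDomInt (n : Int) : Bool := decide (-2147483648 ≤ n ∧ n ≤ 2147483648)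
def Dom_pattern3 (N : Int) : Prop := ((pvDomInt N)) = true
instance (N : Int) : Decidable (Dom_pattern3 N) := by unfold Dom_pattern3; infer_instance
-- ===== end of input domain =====

-- B replaces A's cross-row running counter with a closed-form per-cell formula; alternative decomposition, same O(N^2) cost.


-- ===== PORT A =====
-- one outer-loop step: temp = [0]*j; for _ in range(N-j): temp.append(c); c += 1; ans.append(temp)
def pattern3Step (N : Int) (st : List (List Int) × Int) (j : Int) : List (List Int) × Int :=
  let inner := (PySem.List.pyRange 0 (N - j) 1).foldl
      (fun (tc : List Int × Int) _ => (tc.1 ++ [tc.2], tc.2 + 1))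
      (List.replicate j.toNat 0, st.2)
  (st.1 ++ [inner.1], inner.2)

def pattern3 (N : Int) : List (List Int) :=
  ((PySem.List.pyRange 0 N 1).foldl (pattern3Step N) ([], 1)).1

-- ===== PORT B =====
def pattern3Row (N : Int) (j : Int) : List Int :=
  (PySem.List.pyRange 0 N 1).map
    (fun i => if i < j then 0 else j * N - PySem.Int.floordiv (j * (j - 1)) 2 + (i - j) + 1)

def pattern3_alt (N : Int) : List (List Int) :=
  (PySem.List.pyRange 0 N 1).map (pattern3Row N)

-- ===== PRECONDITION & SPEC =====
def Spec_pattern3 (N : Int) (out : List (List Int)) : Prop := out = pattern3_alt N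
instance (N : Int) (out : List (List Int)) : Decidable (Spec_pattern3 N out) := by unfold Spec_pattern3; infer_instance

-- ===== CLAIM (what is proved, stated in full; the proofs are below) =====
def Claim_equal_pattern3 : Prop := ∀ (N : Int), Dom_pattern3 N → Spec_pattern3 N (pattern3 N)

-- ===== LEMMAS AND PROOFS =====

-- B's floor division on the witness j*(j-1) equals the Nat triangle value
lemma fd_eq (j : Nat) :
    PySem.Int.floordiv ((j : Int) * ((j : Int) - 1)) 2 = ((j * (j - 1) / 2 : Nat) : Int) := by
  rw [PySem.Int.floordiv_eq_ediv_of_pos (by omega)]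
  cases j with
  | zero => simp
  | succ k =>
    have h : ((k + 1 : Nat) : Int) * (((k + 1 : Nat) : Int) - 1) = (((k + 1) * k : Nat) : Int) := by
      push_cast; ring
    rw [h, Nat.succ_sub_one, Int.natCast_div]
    norm_num

-- triangle-number step
lemma tri_step (n : Nat) : (n + 1) * n / 2 = n * (n - 1) / 2 + n := by
  cases n with
  | zero => rfl
  | succ k =>
    obtain ⟨m, hm⟩ := Nat.even_mul_succ_self k
    have h1 : (k + 1 + 1) * (k + 1) = k * (k + 1) + 2 * (k + 1) := by ring
    have h2 : (k + 1) * (k + 1 - 1) = k * (k + 1) := by rw [Nat.add_sub_cancel]; ring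
    omega

-- the counter value before processing row j
def cVal (N : Int) (j : Nat) : Int := (j : Int) * N - ((j * (j - 1) / 2 : Nat) : Int) + 1

-- inner append loop: appends c, c+1, …, c+m-1 and leaves counter c+m
lemma inner_loop (m : Nat) (temp : List Int) (c : Int) :
    (PySem.List.pyRange 0 (m : Int) 1).foldl
      (fun (tc : List Int × Int) _ => (tc.1 ++ [tc.2], tc.2 + 1)) (temp, c)
    = (temp ++ (List.range m).map (fun (k : Nat) => c + (k : Int)), c + m) := by
  induction m with
  | zero => simp [PySem.List.pyRange_one_eq_nil]
  | succ n ih =>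
    have h : ((n : Int) + 1) = ((n + 1 : Nat) : Int) := by push_cast; ring
    rw [← h, PySem.List.pyRange_one_succ_right (by positivity), List.foldl_append, ih]
    simp [List.range_succ]
    ring

-- A's row j equals B's row j
lemma row_eq (N : Int) (j : Nat) (hj : (j : Int) < N) :
    List.replicate j (0 : Int) ++ (List.range (N - (j : Int)).toNat).map (fun (k : Nat) => cVal N j + (k : Int))
    = pattern3Row N (j : Int) := by
  unfold pattern3Row
  rw [PySem.List.pyRange_one, fd_eq]
  apply List.ext_getElem
  · simp; omega
  · intro i h1 h2
    rcases Nat.lt_or_ge i j with hij | hij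
    · rw [List.getElem_append_left (by simp [hij]), List.getElem_replicate,
        List.getElem_map, List.getElem_map, List.getElem_range,
        if_pos (by omega)]
    · rw [List.getElem_append_right (by simp [hij]), List.getElem_map, List.getElem_map,
        List.getElem_map, List.getElem_range, List.getElem_range, List.length_replicate,
        if_neg (by omega)]
      simp only [cVal, zero_add]
      omega

-- outer loop invariant: after n rows the accumulator holds B's first n rows and counter cVal N n
lemma outer_loop (N : Int) (n : Nat) (hn : (n : Int) ≤ N) :
    (PySem.List.pyRange 0 (n : Int) 1).foldl (pattern3Step N) ([], 1)
    = ((PySem.List.pyRange 0 (n : Int) 1).map (pattern3Row N), cVal N n) := by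
  induction n with
  | zero => simp [PySem.List.pyRange_one_eq_nil, cVal]
  | succ n ih =>
    have hn' : (n : Int) ≤ N := by push_cast at hn ⊢; omega
    have h : ((n : Int) + 1) = ((n + 1 : Nat) : Int) := by push_cast; ring
    rw [← h, PySem.List.pyRange_one_succ_right (by positivity), List.foldl_append,
      List.map_append, ih hn']
    simp only [List.foldl_cons, List.foldl_nil, List.map_cons, List.map_nil]
    unfold pattern3Step
    have hm : N - (n : Int) = (((N - (n : Int)).toNat : Nat) : Int) := by omega
    rw [hm, inner_loop]
    have hjn : ((n : Int)).toNat = n := by omega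
    rw [hjn, row_eq N n (by omega)]
    dsimp only
    refine Prod.ext rfl ?_
    -- counter: cVal N n + (N - n) = cVal N (n+1)
    simp only [cVal]
    have ht : (n + 1) * ((n + 1) - 1) / 2 = n * (n - 1) / 2 + n := by
      simpa using tri_step n
    rw [ht]
    have hmul : ((n + 1 : Nat) : Int) * N = (n : Int) * N + N := by push_cast; ring
    omega

-- ===== VERDICT (by name: the statement is the Claim_ definition above) =====
theorem pattern3_spec : Claim_equal_pattern3 := by
  intro N _
  unfold Spec_pattern3 pattern3 pattern3_alt
  by_cases h : N ≤ 0
  · rw [PySem.List.pyRange_one_eq_nil h]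
    rfl
  · have hN : N = ((N.toNat : Nat) : Int) := by omega
    rw [hN, outer_loop ((N.toNat : Nat) : Int) N.toNat (le_refl _)]
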